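-- pv_equiv track=rewrite | github.com/geomeza/machine-learning | analysis/csv_training.py | split_sets
-- ===== SOURCE A (Python) =====
-- def split_sets(data, num_sets):
--     training_sets = []
--     testing_sets = []
--     interval = len(data)//num_sets
--     for i in range(num_sets):
--         training = []
--         testing = []
--         starter = i*interval
--         cutoff = i*interval + interval
--         for j in range(len(data)):
--             if j > starter and j <= cutoff:
--                 testing.append(data[j])
--             else:
--                 training.append(data[j])
--         testing_sets.append(testing)
--         training_sets.append(training)
--     return training_sets, testing_sets
-- ===== SOURCE B (Python) =====
-- def split_sets(data, num_sets):
--     interval = len(data) // num_sets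
--     training_sets = []
--     testing_sets = []
--     for i in range(num_sets):
--         starter = i * interval
--         cutoff = starter + interval
--         testing_sets.append(data[starter + 1:cutoff + 1])
--         training_sets.append(data[:starter + 1] + data[cutoff + 1:])
--     return training_sets, testing_sets
-- ===== Notes on version B (the rewrite author's own statement) =====
-- stated objective: simpler
-- what changed: The per-element inner scan with an index test is replaced by direct slice extraction: testing = data[starter+1:cutoff+1] and training = data[:starter+1] + data[cutoff+1:], so no element is ever inspected or branched on.
import Mathlib
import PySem

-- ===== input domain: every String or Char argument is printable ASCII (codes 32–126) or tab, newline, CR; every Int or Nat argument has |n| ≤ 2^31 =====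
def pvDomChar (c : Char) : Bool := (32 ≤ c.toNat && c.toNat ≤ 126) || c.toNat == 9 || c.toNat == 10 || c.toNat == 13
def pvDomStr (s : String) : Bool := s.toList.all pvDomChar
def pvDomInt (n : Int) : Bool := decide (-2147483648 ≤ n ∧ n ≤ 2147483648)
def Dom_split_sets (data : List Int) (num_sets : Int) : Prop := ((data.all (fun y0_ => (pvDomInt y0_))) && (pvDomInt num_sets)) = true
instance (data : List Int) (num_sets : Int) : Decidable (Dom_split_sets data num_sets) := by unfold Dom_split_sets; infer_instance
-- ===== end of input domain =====

-- B replaces A's per-element inner index scan by direct slice extraction per interval (objective: simpler).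

-- ===== PORT A =====
def split_sets (data : List Int) (num_sets : Int) : List (List Int) × List (List Int) :=
  let interval := PySem.Int.floordiv (data.length : Int) num_sets
  let res :=
    (PySem.List.pyRange 0 num_sets 1).foldl
      (fun (acc : List (List Int) × List (List Int)) i =>
        let starter := i * interval
        let cutoff := i * interval + interval
        let tt :=
          (PySem.List.pyRange 0 (data.length : Int) 1).foldl
            (fun (tt : List Int × List Int) j =>
              if starter < j ∧ j ≤ cutoff then
                (tt.1, tt.2 ++ [PySem.List.pyGetD data j 0])
              else
                (tt.1 ++ [PySem.List.pyGetD data j 0], tt.2))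
            ([], [])
        (acc.1 ++ [tt.1], acc.2 ++ [tt.2]))
      ([], [])
  res

-- ===== PORT B =====
def split_sets_alt (data : List Int) (num_sets : Int) : List (List Int) × List (List Int) :=
  let interval := PySem.Int.floordiv (data.length : Int) num_sets
  (PySem.List.pyRange 0 num_sets 1).foldl
    (fun (acc : List (List Int) × List (List Int)) i =>
      let starter := i * interval
      let cutoff := starter + interval
      (acc.1 ++ [PySem.List.slice data none (some (starter + 1)) ++
                 PySem.List.slice data (some (cutoff + 1)) none],
       acc.2 ++ [PySem.List.slice data (some (starter + 1)) (some (cutoff + 1))]))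
    ([], [])

-- ===== PRECONDITION & SPEC =====
-- Pre_ excludes exactly num_sets = 0, where the Python A raises ZeroDivisionError.
def Pre_split_sets (data : List Int) (num_sets : Int) : Prop := num_sets ≠ 0
instance (data : List Int) (num_sets : Int) : Decidable (Pre_split_sets data num_sets) := by unfold Pre_split_sets; infer_instance
def pvWitness_split_sets : List Int × Int := ([1, 2, 3, 4, 5], 2)

def Spec_split_sets (data : List Int) (num_sets : Int) (out : List (List Int) × List (List Int)) : Prop := out = split_sets_alt data num_sets
instance (data : List Int) (num_sets : Int) (out : List (List Int) × List (List Int)) : Decidable (Spec_split_sets data num_sets out) := by unfold Spec_split_sets; infer_instance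

-- ===== CLAIM (what is proved, stated in full; the proofs are below) =====
def Claim_equal_split_sets : Prop := ∀ (data : List Int) (num_sets : Int), Dom_split_sets data num_sets → Pre_split_sets data num_sets → Spec_split_sets data num_sets (split_sets data num_sets)

-- ===== LEMMAS AND PROOFS =====

-- A's inner element-by-element scan over indices 0..m-1, characterised by take/drop of data:
-- the scan over the first m indices with window (s, c] yields exactly the two contiguous pieces.
lemma inner_scan_eq (data : List Int) (s c : Int) (hs : 0 ≤ s) (hsc : s ≤ c) :
    ∀ m : Nat, m ≤ data.length →
      (PySem.List.pyRange 0 (m : Int) 1).foldl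
        (fun (tt : List Int × List Int) j =>
          if s < j ∧ j ≤ c then
            (tt.1, tt.2 ++ [PySem.List.pyGetD data j 0])
          else
            (tt.1 ++ [PySem.List.pyGetD data j 0], tt.2))
        ([], [])
      = ((data.take m).take (s + 1).toNat ++ (data.take m).drop (c + 1).toNat,
         ((data.take m).drop (s + 1).toNat).take (c - s).toNat) := by
  obtain ⟨sN, rfl⟩ : ∃ n : Nat, s = (n : Int) := ⟨s.toNat, (Int.toNat_of_nonneg hs).symm⟩
  obtain ⟨cN, rfl⟩ : ∃ n : Nat, c = (n : Int) := ⟨c.toNat, (Int.toNat_of_nonneg (le_trans hs hsc)).symm⟩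
  have hsc' : sN ≤ cN := by exact_mod_cast hsc
  have h1 : ((sN : Int) + 1).toNat = sN + 1 := by omega
  have h2 : ((cN : Int) + 1).toNat = cN + 1 := by omega
  have h3 : ((cN : Int) - (sN : Int)).toNat = cN - sN := by omega
  rw [h1, h2, h3]
  intro m
  induction m with
  | zero =>
      intro _
      simp [PySem.List.pyRange_one_eq_nil (le_refl (0 : Int))]
  | succ m ih =>
      intro hm1
      have hm : m ≤ data.length := Nat.le_of_succ_le hm1
      have hmlt : m < data.length := hm1
      have hcast : ((m + 1 : Nat) : Int) = (m : Int) + 1 := by push_cast; ring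
      rw [hcast, PySem.List.pyRange_one_succ_right (by positivity), List.foldl_append, ih hm]
      have hx : PySem.List.pyGetD data (m : Int) 0 = data[m] := by
        rw [PySem.List.pyGetD_natCast]; exact List.getD_eq_getElem data 0 hmlt
      have hT : (data.take m).length = m := by simp [List.length_take]; omega
      rw [List.take_succ_eq_append_getElem hmlt]
      simp only [List.foldl_cons, List.foldl_nil, hx]
      split_ifs with hcond
      · -- sN < m ≤ cN : element m goes to testing
        have hsm : sN < m := by omega
        have hmc : m ≤ cN := by omega
        have e1 : sN + 1 - m = 0 := by omega
        have ek : cN + 1 - m = (cN - m) + 1 := by omega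
        have h4 : List.take (sN + 1) (List.take m data ++ [data[m]]) = List.take (sN + 1) (List.take m data) := by
          rw [List.take_append, hT, e1, List.take_zero, List.append_nil]
        have h5 : List.drop (cN + 1) (List.take m data ++ [data[m]]) = List.drop (cN + 1) (List.take m data) := by
          rw [List.drop_append, hT, ek]; simp
        have h6 : List.drop (sN + 1) (List.take m data ++ [data[m]]) = List.drop (sN + 1) (List.take m data) ++ [data[m]] := by
          rw [List.drop_append, hT, e1, List.drop_zero]
        have h7 : List.take (cN - sN) (List.drop (sN + 1) (List.take m data) ++ [data[m]]) = List.take (cN - sN) (List.drop (sN + 1) (List.take m data)) ++ [data[m]] := by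
          rw [List.take_append, List.length_drop, hT]
          have e4 : cN - sN - (m - (sN + 1)) = (cN - m) + 1 := by omega
          rw [e4]; simp
        rw [h4, h5, h6, h7]
      · by_cases hms : m ≤ sN
        · -- m ≤ sN : element m goes to the first training part
          have h4 : List.take (sN + 1) (List.take m data ++ [data[m]]) = List.take m data ++ [data[m]] :=
            List.take_of_length_le (by simp [hT]; omega)
          have h5 : List.drop (cN + 1) (List.take m data ++ [data[m]]) = [] :=
            List.drop_eq_nil_of_le (by simp [hT]; omega)
          have h6 : List.take (sN + 1) (List.take m data) = List.take m data :=
            List.take_of_length_le (by rw [hT]; omega)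
          have h7 : List.drop (cN + 1) (List.take m data) = [] :=
            List.drop_eq_nil_of_le (by rw [hT]; omega)
          have h8 : List.drop (sN + 1) (List.take m data ++ [data[m]]) = [] :=
            List.drop_eq_nil_of_le (by simp [hT]; omega)
          have h9 : List.drop (sN + 1) (List.take m data) = [] :=
            List.drop_eq_nil_of_le (by rw [hT]; omega)
          rw [h4, h5, h6, h7, h8, h9]; simp
        · -- cN < m : element m goes to the second training part
          have hcm : cN < m := by omega
          have e1 : sN + 1 - m = 0 := by omega
          have e2 : cN + 1 - m = 0 := by omega
          have h4 : List.take (sN + 1) (List.take m data ++ [data[m]]) = List.take (sN + 1) (List.take m data) := by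
            rw [List.take_append, hT, e1, List.take_zero, List.append_nil]
          have h5 : List.drop (cN + 1) (List.take m data ++ [data[m]]) = List.drop (cN + 1) (List.take m data) ++ [data[m]] := by
            rw [List.drop_append, hT, e2, List.drop_zero]
          have h6 : List.drop (sN + 1) (List.take m data ++ [data[m]]) = List.drop (sN + 1) (List.take m data) ++ [data[m]] := by
            rw [List.drop_append, hT, e1, List.drop_zero]
          have h7 : List.take (cN - sN) (List.drop (sN + 1) (List.take m data) ++ [data[m]]) = List.take (cN - sN) (List.drop (sN + 1) (List.take m data)) := by
            rw [List.take_append, List.length_drop, hT]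
            have e3 : cN - sN - (m - (sN + 1)) = 0 := by omega
            rw [e3, List.take_zero, List.append_nil]
          rw [h4, h5, h6, h7, List.append_assoc]

-- ===== VERDICT (by name: the statement is the Claim_ definition above) =====
theorem split_sets_spec : Claim_equal_split_sets := by
  intro data num_sets _ _
  unfold Spec_split_sets split_sets split_sets_alt
  dsimp only
  refine PySem.List.foldl_congr_mem _ _ _ _ ?_
  intro acc i hi
  rw [PySem.List.mem_pyRange_one] at hi
  obtain ⟨hi0, hins⟩ := hi
  have hns : (0:Int) < num_sets := lt_of_le_of_lt hi0 hins
  have hint : 0 ≤ PySem.Int.floordiv (data.length : Int) num_sets :=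
    (PySem.Int.le_floordiv_iff_mul_le hns).mpr (by simp)
  have hs : 0 ≤ i * PySem.Int.floordiv (data.length : Int) num_sets := mul_nonneg hi0 hint
  have hsc : i * PySem.Int.floordiv (data.length : Int) num_sets ≤
      i * PySem.Int.floordiv (data.length : Int) num_sets +
        PySem.Int.floordiv (data.length : Int) num_sets := le_add_of_nonneg_right hint
  have key := inner_scan_eq data _ _ hs hsc data.length (le_refl _)
  rw [key, List.take_length,
      PySem.List.slice_to data (by omega),
      PySem.List.slice_from data (by omega),
      PySem.List.slice_toNat data (by omega) (by omega)]
  have e : (i * PySem.Int.floordiv (data.length : Int) num_sets +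
        PySem.Int.floordiv (data.length : Int) num_sets + 1).toNat -
      (i * PySem.Int.floordiv (data.length : Int) num_sets + 1).toNat =
      (i * PySem.Int.floordiv (data.length : Int) num_sets +
        PySem.Int.floordiv (data.length : Int) num_sets -
        i * PySem.Int.floordiv (data.length : Int) num_sets).toNat := by omega
  rw [e]
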